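-- pv_equiv track=rewrite | github.com/mfisher35/cre_geospatial_data | cre/fs_parsetools.py | update_dict
-- ===== SOURCE A (Python) =====
-- def update_dict(results,cresults):
--     ckeys = set(cresults.keys())
--     keys = set(results.keys())
--
--     for ckey in ckeys:
--         if ckey in keys:
--             results[ckey].append(cresults[ckey])
--         else:
--             results[ckey] = [cresults[ckey]]
--     return results
-- ===== SOURCE B (Python) =====
-- def update_dict(results, cresults):
--     # Group-by reduce: flatten both dicts into one stream of (key, list-of-values)
--     # pairs and fold it with merged[k] = merged.get(k, []) + chunk -- no membership
--     # branching. Returns a new dict (A mutates `results` in place; return values agree).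
--     stream = list(results.items()) + [(k, [v]) for k, v in cresults.items()]
--     merged = {}
--     for k, chunk in stream:
--         merged[k] = merged.get(k, []) + chunk
--     return merged
-- ===== Notes on version B (the rewrite author's own statement) =====
-- stated objective: alternative
-- what changed: Instead of A's single loop over set(cresults) that branches per key (append vs create, mutating results in place), B flattens both dicts into one stream of (key, list) pairs and folds it with a uniform branch-free group-by step merged[k] = merged.get(k, []) + chunk, returning a fresh dict; equivalence is about the return value (A mutates its argument, B does not).
import Mathlib
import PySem

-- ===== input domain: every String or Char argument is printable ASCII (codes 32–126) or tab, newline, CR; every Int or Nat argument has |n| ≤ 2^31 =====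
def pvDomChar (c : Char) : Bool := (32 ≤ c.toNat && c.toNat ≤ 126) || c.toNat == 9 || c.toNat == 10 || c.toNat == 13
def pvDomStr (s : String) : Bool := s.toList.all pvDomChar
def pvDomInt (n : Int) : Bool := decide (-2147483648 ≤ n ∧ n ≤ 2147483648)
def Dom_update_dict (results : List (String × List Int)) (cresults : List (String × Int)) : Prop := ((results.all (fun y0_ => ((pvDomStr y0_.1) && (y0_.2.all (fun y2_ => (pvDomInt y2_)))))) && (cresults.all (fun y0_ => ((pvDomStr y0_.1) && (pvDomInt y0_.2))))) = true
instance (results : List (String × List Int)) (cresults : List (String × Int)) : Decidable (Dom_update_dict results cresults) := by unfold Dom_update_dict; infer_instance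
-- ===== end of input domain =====

-- B replaces A's branching merge loop by a branch-free group-by reduce over one flattened
-- stream of (key, list) pairs; return-value equivalence only: Python A mutates `results`
-- in place, B returns a fresh dict.

-- ===== PORT A =====
def update_dict (results : List (String × List Int)) (cresults : List (String × Int)) : List (String × List Int) :=
  let rd := PySem.Dict.ofList results
  let cd := PySem.Dict.ofList cresults
  let ckeys : PySem.Set String := PySem.Set.ofList cd.keys
  let keys : PySem.Set String := PySem.Set.ofList rd.keys
  (ckeys.foldl (fun d ckey =>
      if PySem.Set.contains keys ckey then
        d.modify ckey [] (fun l => l ++ [cd.getD ckey 0])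
      else
        d.insert ckey [cd.getD ckey 0]) rd).items

-- ===== PORT B =====
def update_dict_alt (results : List (String × List Int)) (cresults : List (String × Int)) : List (String × List Int) :=
  let rd := PySem.Dict.ofList results
  let cd := PySem.Dict.ofList cresults
  let stream := rd.items ++ cd.items.map (fun kv => (kv.1, [kv.2]))
  (stream.foldl (fun m kv => m.insert kv.1 (m.getD kv.1 [] ++ kv.2)) PySem.Dict.empty).items

-- ===== PRECONDITION & SPEC =====
def Spec_update_dict (results : List (String × List Int)) (cresults : List (String × Int)) (out : List (String × List Int)) : Prop := out = update_dict_alt results cresults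
instance (results : List (String × List Int)) (cresults : List (String × Int)) (out : List (String × List Int)) : Decidable (Spec_update_dict results cresults out) := by unfold Spec_update_dict; infer_instance

-- ===== CLAIM (what is proved, stated in full; the proofs are below) =====
def Claim_equal_update_dict : Prop := ∀ (results : List (String × List Int)) (cresults : List (String × Int)), Dom_update_dict results cresults → Spec_update_dict results cresults (update_dict results cresults)

-- ===== LEMMAS AND PROOFS =====

-- B's group-by fold over a block of pairwise-fresh keys just appends those pairs.
theorem foldF_fresh :
    ∀ (l : List (String × List Int)) (m : PySem.Dict String (List Int)),
    (l.map (·.1)).Nodup → (∀ p ∈ l, m.contains p.1 = false) →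
    (l.foldl (fun m kv => m.insert kv.1 (m.getD kv.1 [] ++ kv.2)) m).items = m.items ++ l
  | [], m, _, _ => by simp
  | kv :: l, m, hnd, hfresh => by
    have hnd2 : kv.1 ∉ l.map (·.1) ∧ (l.map (·.1)).Nodup := by
      rw [List.map_cons] at hnd; exact List.nodup_cons.mp hnd
    have hc : m.contains kv.1 = false := hfresh kv (List.mem_cons_self ..)
    have hgd : m.getD kv.1 [] = [] := PySem.Dict.getD_of_not_contains m _ hc
    have hfresh' : ∀ p ∈ l, (m.insert kv.1 (m.getD kv.1 [] ++ kv.2)).contains p.1 = false := by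
      intro p hp
      rw [PySem.Dict.contains_insert]
      have hne : (p.1 == kv.1) = false := by
        simp only [beq_eq_false_iff_ne]
        intro h
        exact hnd2.1 (h ▸ List.mem_map_of_mem (f := (·.1)) hp)
      rw [hne, Bool.false_or]
      exact hfresh p (List.mem_cons_of_mem _ hp)
    simp only [List.foldl_cons]
    rw [foldF_fresh l _ hnd2.2 hfresh',
      PySem.Dict.items_insert_of_not_contains m _ hc, hgd]
    simp

-- Over distinct keys whose singleton chunks follow, B's group-by step coincides with A's
-- branching step (the branch is on membership in the keys of the START dict, which the
-- loop never changes for a key not yet processed).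
theorem foldF_eq_foldA (g : String → Int) (K : PySem.Set String) :
    ∀ (ks : List String) (m : PySem.Dict String (List Int)),
    ks.Nodup → (∀ k ∈ ks, PySem.Set.contains K k = m.contains k) →
    ((ks.map (fun k => (k, [g k]))).foldl
        (fun m kv => m.insert kv.1 (m.getD kv.1 [] ++ kv.2)) m)
    = ks.foldl (fun d k =>
        if PySem.Set.contains K k then d.modify k [] (fun l => l ++ [g k])
        else d.insert k [g k]) m
  | [], _, _, _ => rfl
  | k :: ks, m, hnd, hK => by
    obtain ⟨hknot, hnd'⟩ := List.nodup_cons.mp hnd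
    have hKk := hK k (List.mem_cons_self ..)
    have hstep : m.insert k (m.getD k [] ++ [g k])
        = (if PySem.Set.contains K k then m.modify k [] (fun l => l ++ [g k])
           else m.insert k [g k]) := by
      by_cases hc : PySem.Set.contains K k = true
      · rw [if_pos hc]; rfl
      · have hc' : m.contains k = false := by rw [← hKk]; simpa using hc
        rw [if_neg hc, PySem.Dict.getD_of_not_contains m _ hc']
        simp
    have hK' : ∀ k' ∈ ks, PySem.Set.contains K k'
        = (m.insert k (m.getD k [] ++ [g k])).contains k' := by
      intro k' hk'
      rw [PySem.Dict.contains_insert]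
      have hne : (k' == k) = false := by
        simp only [beq_eq_false_iff_ne]; rintro rfl; exact hknot hk'
      rw [hne, Bool.false_or]
      exact hK k' (List.mem_cons_of_mem _ hk')
    simp only [List.map_cons, List.foldl_cons]
    rw [foldF_eq_foldA g K ks _ hnd' hK', hstep]

theorem ud_eq (results : List (String × List Int)) (cresults : List (String × Int)) :
    update_dict results cresults = update_dict_alt results cresults := by
  unfold update_dict update_dict_alt
  dsimp only
  have hcdk : (PySem.Dict.ofList cresults).keys.Nodup := PySem.Dict.nodup_keys_ofList _
  have hrdk : (PySem.Dict.ofList results).keys.Nodup := PySem.Dict.nodup_keys_ofList _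
  -- phase 1 of B: folding rd's own items from the empty dict rebuilds rd
  rw [List.foldl_append]
  have hphase1 : ((PySem.Dict.ofList results).items.foldl
      (fun m kv => m.insert kv.1 (m.getD kv.1 [] ++ kv.2)) PySem.Dict.empty)
      = PySem.Dict.ofList results := by
    apply PySem.Dict.ext
    rw [foldF_fresh _ _ hrdk (fun p _ => PySem.Dict.contains_empty p.1)]
    simp [PySem.Dict.empty]
  rw [hphase1]
  -- phase 2 of B: the singleton chunks are cd.keys with values cd.getD
  have hitems : (PySem.Dict.ofList cresults).items.map (fun kv => (kv.1, ([kv.2] : List Int)))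
      = (PySem.Dict.ofList cresults).keys.map
          (fun k => (k, [(PySem.Dict.ofList cresults).getD k 0])) := by
    rw [PySem.Dict.items_eq_map_keys _ hcdk 0, List.map_map]
    rfl
  rw [hitems]
  -- A iterates over the same key list
  rw [PySem.Set.ofList_eq_self_of_nodup _ hcdk]
  have hK : ∀ k ∈ (PySem.Dict.ofList cresults).keys,
      PySem.Set.contains (PySem.Set.ofList (PySem.Dict.ofList results).keys) k
        = (PySem.Dict.ofList results).contains k := by
    intro k _
    rw [Bool.eq_iff_iff, PySem.Set.contains_iff, PySem.Set.mem_ofList,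
      PySem.Dict.contains_iff_mem_keys]
  rw [foldF_eq_foldA (fun k => (PySem.Dict.ofList cresults).getD k 0)
      (PySem.Set.ofList (PySem.Dict.ofList results).keys)
      (PySem.Dict.ofList cresults).keys (PySem.Dict.ofList results) hcdk hK]

-- ===== VERDICT (by name: the statement is the Claim_ definition above) =====
theorem update_dict_spec : Claim_equal_update_dict := by
  intro results cresults _
  unfold Spec_update_dict
  exact ud_eq results cresults
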